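-- pv_equiv track=rewrite | github.com/biovino1/PfamPlayground | scripts/cons_seq.py | most_com
-- ===== SOURCE A (Python) =====
-- def most_com(seqs: dict, chars: dict) -> str:
--     """Returns most representative sequence for a family.
--
--     :param seqs: dictionary where key is sequence name and value is sequence string
--     :param chars: dictionary where key is position and value is dictionary of characters and their
--     counts
--     :return: most representative sequence
--     """
--
--     scores = {}
--     for seq in seqs.keys():
--         scores[seq] = 0
--         sequence = seqs[seq]
--         for i, char in enumerate(sequence):
--             if char in chars[i]:
--                 scores[seq] += 1
--
--     return max(scores, key=scores.get)
-- ===== SOURCE B (Python) =====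
-- def most_com(seqs: dict, chars: dict) -> str:
--     """Returns most representative sequence for a family.
--
--     Column-major rewrite: walk positions (columns) instead of sequences,
--     keeping an array of counts aligned with the sequence names, then pick
--     the name at the first index of the maximal count.
--     """
--
--     names = list(seqs)
--     strings = list(seqs.values())
--     counts = [0] * len(names)
--     width = max(map(len, strings), default=0)
--     for i in range(width):
--         allowed = set(chars[i])
--         counts = [c + (i < len(s) and s[i] in allowed)
--                   for c, s in zip(counts, strings)]
--     return names[counts.index(max(counts))]
-- ===== Notes on version B (the rewrite author's own statement) =====
-- stated objective: alternative
-- what changed: B transposes the loop nest: instead of scoring each sequence with its own inner position loop and a scores dict, it walks positions (columns) once, building the per-column allowed set and bumping an index-aligned counts array, then returns names[counts.index(max(counts))].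
import Mathlib
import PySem

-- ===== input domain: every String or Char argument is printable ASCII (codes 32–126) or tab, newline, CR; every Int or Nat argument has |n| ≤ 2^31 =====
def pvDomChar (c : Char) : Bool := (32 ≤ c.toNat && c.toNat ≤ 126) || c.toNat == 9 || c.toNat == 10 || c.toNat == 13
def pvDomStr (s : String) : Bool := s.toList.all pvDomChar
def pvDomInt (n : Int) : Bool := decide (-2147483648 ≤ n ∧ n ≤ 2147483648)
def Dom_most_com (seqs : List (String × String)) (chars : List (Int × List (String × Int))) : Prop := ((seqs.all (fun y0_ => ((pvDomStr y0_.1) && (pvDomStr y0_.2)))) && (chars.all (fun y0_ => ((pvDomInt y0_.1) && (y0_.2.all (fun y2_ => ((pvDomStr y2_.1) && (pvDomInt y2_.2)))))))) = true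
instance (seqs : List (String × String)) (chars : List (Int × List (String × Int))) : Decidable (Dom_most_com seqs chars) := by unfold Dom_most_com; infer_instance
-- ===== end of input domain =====

-- B transposes A's loop nest: it walks positions (columns) over an index-aligned counts array instead of
-- scoring each sequence row-by-row into a dict, then returns names[counts.index(max(counts))].
-- Both ports model the dict arguments as association lists.

-- ===== PORT A =====
-- `char in chars[i]`: key-membership in the inner dict (the `none` branch is Python's KeyError, excluded by Pre_)
def memAt (chars : List (Int × List (String × Int))) (i : Int) (c : Char) : Bool :=
  match PySem.Dict.get? (PySem.Dict.mk chars) i with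
  | some d => (PySem.Dict.mk d).contains (String.ofList [c])
  | none => false

def most_com (seqs : List (String × String)) (chars : List (Int × List (String × Int))) : String :=
  -- scores = {}; for seq in seqs.keys(): scores[seq] = 0; sequence = seqs[seq]; inner loop increments scores[seq]
  let scores : PySem.Dict String Int :=
    seqs.foldl (fun scores p =>
      let scores := scores.insert p.1 (0 : Int)
      let sequence := (PySem.Dict.get? (PySem.Dict.mk seqs) p.1).getD ""
      (PySem.List.enumerate sequence.toList).foldl
        (fun scores q =>
          if memAt chars q.1 q.2 then scores.modify p.1 0 (· + 1) else scores)
        scores)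
      PySem.Dict.empty
  -- return max(scores, key=scores.get)
  match PySem.List.max? scores.keys (fun k => scores.getD k 0) with
  | some k => k
  | none => ""   -- Python max raises ValueError on an empty dict; Pre_most_com excludes seqs = []

-- ===== PORT B =====
-- allowed = set(chars[i])  (set of the keys of the column dict; missing key is Python's KeyError, excluded by Pre_)
def allowedAt (chars : List (Int × List (String × Int))) (i : Int) : PySem.Set String :=
  PySem.Set.ofList (((PySem.Dict.get? (PySem.Dict.mk chars) i).getD []).map Prod.fst)

-- one cell of the comprehension: c + (i < len(s) and s[i] in allowed)
def colStep (allowed : PySem.Set String) (i : Int) (c : Int) (s : String) : Int :=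
  if i < PySem.Str.len s then
    match PySem.Str.pyGet? s i with
    | some ch => if PySem.Set.contains allowed (String.ofList [ch]) then c + 1 else c
    | none => c
  else c

def most_com_alt (seqs : List (String × String)) (chars : List (Int × List (String × Int))) : String :=
  let names := seqs.map Prod.fst
  let strings := seqs.map Prod.snd
  let counts0 : List Int := List.replicate names.length 0
  let width : Int := PySem.List.maxD (strings.map PySem.Str.len) (fun x => x) 0
  let counts := (PySem.List.pyRange 0 width 1).foldl
      (fun counts i => List.zipWith (colStep (allowedAt chars i) i) counts strings) counts0
  -- return names[counts.index(max(counts))]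
  match PySem.List.max? counts (fun x => x) with
  | none => ""       -- max([]) raises ValueError; Pre_most_com excludes seqs = []
  | some m =>
      match PySem.List.index? counts m with
      | some j => (PySem.List.pyGet? names (j : Int)).getD ""
      | none => ""   -- unreachable: max(counts) is an element of counts

-- ===== PRECONDITION & SPEC =====
-- Pre_ excludes exactly the inputs where the Pythons raise: an empty seqs (max's ValueError) and a sequence
-- position absent from chars (KeyError); it also requires distinct seq names, since the seqs list encodes a
-- Python dict, which cannot carry duplicate keys.
def Pre_most_com (seqs : List (String × String)) (chars : List (Int × List (String × Int))) : Prop :=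
  seqs ≠ [] ∧ (seqs.map Prod.fst).Nodup ∧
  ∀ p ∈ seqs, ∀ i : Nat, i < p.2.length → (i : Int) ∈ chars.map Prod.fst
instance (seqs : List (String × String)) (chars : List (Int × List (String × Int))) : Decidable (Pre_most_com seqs chars) := by unfold Pre_most_com; infer_instance

def pvWitness_most_com : (List (String × String)) × (List (Int × List (String × Int))) :=
  ([("s1", "AB"), ("s2", "AA")], [(0, [("A", 2)]), (1, [("A", 1), ("B", 1)])])

def Spec_most_com (seqs : List (String × String)) (chars : List (Int × List (String × Int))) (out : String) : Prop := out = most_com_alt seqs chars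
instance (seqs : List (String × String)) (chars : List (Int × List (String × Int))) (out : String) : Decidable (Spec_most_com seqs chars out) := by unfold Spec_most_com; infer_instance

-- ===== CLAIM (what is proved, stated in full; the proofs are below) =====
def Claim_equal_most_com : Prop := ∀ (seqs : List (String × String)) (chars : List (Int × List (String × Int))), Dom_most_com seqs chars → Pre_most_com seqs chars → Spec_most_com seqs chars (most_com seqs chars)

-- ===== LEMMAS AND PROOFS =====

-- the per-sequence membership count both programs boil down to
def scoreOf (chars : List (Int × List (String × Int))) (s : String) : Int :=
  (PySem.List.enumerate s.toList).foldl
    (fun acc q => if memAt chars q.1 q.2 then acc + 1 else acc) 0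

---------------------------------------------------------------- A side

-- the conditional count, restarted from an arbitrary accumulator
theorem score_fold_shift (chars : List (Int × List (String × Int))) (l : List (Int × Char)) (a : Int) :
    l.foldl (fun acc q => if memAt chars q.1 q.2 then acc + 1 else acc) a
      = a + l.foldl (fun acc q => if memAt chars q.1 q.2 then acc + 1 else acc) 0 := by
  induction l generalizing a with
  | nil => simp
  | cons q l ih =>
    simp only [List.foldl_cons]
    rw [ih, ih (if memAt chars q.1 q.2 then (0:Int) + 1 else 0)]
    split_ifs <;> omega

-- A's inner loop: getD at any key
theorem inner_getD (chars : List (Int × List (String × Int))) (l : List (Int × Char))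
    (k j : String) (sc : PySem.Dict String Int) :
    (l.foldl (fun sc q => if memAt chars q.1 q.2 then sc.modify k 0 (· + 1) else sc) sc).getD j 0
      = if j = k then sc.getD k 0 + l.foldl (fun acc q => if memAt chars q.1 q.2 then acc + 1 else acc) 0
        else sc.getD j 0 := by
  induction l generalizing sc with
  | nil => simp only [List.foldl_nil]; split_ifs with h <;> simp [h]
  | cons q l ih =>
    simp only [List.foldl_cons]
    by_cases hm : memAt chars q.1 q.2
    · simp only [hm, if_true, ih, PySem.Dict.getD_modify]
      rw [score_fold_shift chars l ((0:Int)+1)]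
      split_ifs <;> omega
    · simp [hm, ih]

-- A's inner loop: keys are unchanged (the modified key is present)
theorem inner_keys (chars : List (Int × List (String × Int))) (l : List (Int × Char))
    (k : String) (sc : PySem.Dict String Int) (hk : sc.contains k = true) :
    (l.foldl (fun sc q => if memAt chars q.1 q.2 then sc.modify k 0 (· + 1) else sc) sc).keys
      = sc.keys := by
  induction l generalizing sc with
  | nil => rfl
  | cons q l ih =>
    simp only [List.foldl_cons]
    by_cases hm : memAt chars q.1 q.2
    · simp only [hm, if_true]
      rw [ih _ (by simp [PySem.Dict.contains_modify, hk])]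
      rw [PySem.Dict.keys_modify, PySem.Dict.keys_insert_of_contains _ _ hk]
    · simp [hm, ih _ hk]

-- contains is determined by keys
theorem contains_of_keys_eq {ν : Type} (d d' : PySem.Dict String ν) (h : d.keys = d'.keys) (j : String) :
    d.contains j = d'.contains j := by
  rw [PySem.Dict.contains_eq_decide_mem_keys, PySem.Dict.contains_eq_decide_mem_keys, h]

-- A's outer loop, characterised on keys and values, for any starting accumulator disjoint from the remaining names
theorem outer_char (chars : List (Int × List (String × Int))) (seqsD : PySem.Dict String String)
    (rest : List (String × String)) (sc : PySem.Dict String Int)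
    (hlook : ∀ p ∈ rest, seqsD.get? p.1 = some p.2)
    (hfresh : ∀ p ∈ rest, sc.contains p.1 = false)
    (hnd : (rest.map Prod.fst).Nodup) :
    (rest.foldl (fun scores p =>
        let scores := scores.insert p.1 (0 : Int)
        let sequence := (seqsD.get? p.1).getD ""
        (PySem.List.enumerate sequence.toList).foldl
          (fun scores q =>
            if memAt chars q.1 q.2 then scores.modify p.1 0 (· + 1) else scores)
          scores) sc).keys = sc.keys ++ rest.map Prod.fst
    ∧ (∀ j, sc.contains j = true →
        (rest.foldl (fun scores p =>
          let scores := scores.insert p.1 (0 : Int)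
          let sequence := (seqsD.get? p.1).getD ""
          (PySem.List.enumerate sequence.toList).foldl
            (fun scores q =>
              if memAt chars q.1 q.2 then scores.modify p.1 0 (· + 1) else scores)
            scores) sc).getD j 0 = sc.getD j 0)
    ∧ (∀ p ∈ rest,
        (rest.foldl (fun scores p =>
          let scores := scores.insert p.1 (0 : Int)
          let sequence := (seqsD.get? p.1).getD ""
          (PySem.List.enumerate sequence.toList).foldl
            (fun scores q =>
              if memAt chars q.1 q.2 then scores.modify p.1 0 (· + 1) else scores)
            scores) sc).getD p.1 0 = scoreOf chars p.2) := by
  induction rest generalizing sc with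
  | nil => refine ⟨by simp, fun j _ => rfl, fun p hp => absurd hp (by simp)⟩
  | cons p rest ih =>
    have hseq : (seqsD.get? p.1).getD "" = p.2 := by rw [hlook p (by simp)]; rfl
    simp only [List.foldl_cons]
    set sc1 := sc.insert p.1 (0 : Int) with hsc1
    set l := PySem.List.enumerate ((seqsD.get? p.1).getD "").toList with hl
    set sc2 := l.foldl (fun scores q =>
        if memAt chars q.1 q.2 then scores.modify p.1 0 (· + 1) else scores) sc1 with hsc2
    have hfp : sc.contains p.1 = false := hfresh p (by simp)
    have hk1 : sc1.contains p.1 = true := PySem.Dict.contains_insert_self _ _ _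
    have hkeys2 : sc2.keys = sc.keys ++ [p.1] := by
      rw [hsc2, inner_keys _ _ _ _ hk1, hsc1, PySem.Dict.keys_insert_of_not_contains _ _ hfp]
    have hcont2 : ∀ j, sc2.contains j = (j == p.1 || sc.contains j) := by
      intro j
      rw [contains_of_keys_eq sc2 sc1 (by rw [hsc2, inner_keys _ _ _ _ hk1]) j,
        hsc1, PySem.Dict.contains_insert]
    have hgd2 : ∀ j, sc2.getD j 0 = if j = p.1 then scoreOf chars p.2 else sc.getD j 0 := by
      intro j
      rw [hsc2, inner_getD]
      by_cases hj : j = p.1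
      · simp only [hj, if_true, hsc1, PySem.Dict.getD_insert_self]
        rw [scoreOf, ← hseq, ← hl]; omega
      · simp only [hj, if_false, hsc1, PySem.Dict.getD_insert]
    have hnd' : (rest.map Prod.fst).Nodup := (List.nodup_cons.mp hnd).2
    have hpnotin : p.1 ∉ rest.map Prod.fst := (List.nodup_cons.mp hnd).1
    have hfresh' : ∀ p' ∈ rest, sc2.contains p'.1 = false := by
      intro p' hp'
      rw [hcont2]
      have h1 : p'.1 ≠ p.1 := by
        intro h; exact hpnotin (h ▸ List.mem_map_of_mem hp')
      simp [h1, hfresh p' (List.mem_cons_of_mem _ hp')]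
    obtain ⟨ika, ikb, ikc⟩ := ih sc2 (fun p' hp' => hlook p' (List.mem_cons_of_mem _ hp')) hfresh' hnd'
    refine ⟨?_, ?_, ?_⟩
    · rw [ika, hkeys2]; simp
    · intro j hj
      have hjp : j ≠ p.1 := by
        intro h; rw [h] at hj; rw [hj] at hfp; exact absurd hfp (by simp)
      rw [ikb j (by rw [hcont2]; simp [hj]), hgd2, if_neg hjp]
    · intro p' hp'
      rcases List.mem_cons.mp hp' with h | h
      · subst h
        rw [ikb p'.1 (by rw [hcont2]; simp), hgd2, if_pos rfl]
      · exact ikc p' h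

-- names of a nodup association list look up to their own value
theorem lookup_own (seqs : List (String × String)) (hnd : (seqs.map Prod.fst).Nodup)
    (p : String × String) (hp : p ∈ seqs) :
    PySem.Dict.get? (PySem.Dict.mk seqs) p.1 = some p.2 := by
  apply PySem.Dict.get?_of_mem_items (d := PySem.Dict.mk seqs) (k := p.1) (v := p.2) hp
  rw [PySem.Dict.keys_mk]; exact hnd

---------------------------------------------------------------- B side

-- fusing two zipWiths against the same right list
theorem zipWith_zipWith (f g : Int → String → Int) (cs : List Int) (ss : List String) :
    List.zipWith f (List.zipWith g cs ss) ss = List.zipWith (fun c s => f (g c s) s) cs ss := by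
  induction cs generalizing ss with
  | nil => simp
  | cons c cs ih => cases ss with
    | nil => simp
    | cons s ss => simp [ih]

theorem zipWith_left (cs : List Int) (ss : List String) (h : cs.length = ss.length) :
    List.zipWith (fun c _ => c) cs ss = cs := by
  induction cs generalizing ss with
  | nil => simp
  | cons c cs ih => cases ss with
    | nil => simp at h
    | cons s ss => simp only [List.zipWith_cons_cons, List.cons.injEq, true_and]
                   exact ih ss (by simpa using h)

theorem zipWith_replicate_zero (g : Int → String → Int) (ss : List String) :
    List.zipWith g (List.replicate ss.length (0:Int)) ss = ss.map (g 0) := by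
  induction ss with
  | nil => rfl
  | cons s ss ih => simp [List.replicate_succ, ih]

theorem foldl_id {α : Type} (l : List α) (a : Int) : l.foldl (fun a _ => a) a = a := by
  induction l generalizing a with
  | nil => rfl
  | cons x l ih => exact ih a

-- B's column fold, turned into one independent fold per sequence
theorem colfold (chars : List (Int × List (String × Int))) (l : List Int)
    (counts : List Int) (strings : List String) (hlen : counts.length = strings.length) :
    l.foldl (fun counts i => List.zipWith (colStep (allowedAt chars i) i) counts strings) counts
      = List.zipWith (fun c s => l.foldl (fun a i => colStep (allowedAt chars i) i a s) c) counts strings := by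
  induction l generalizing counts with
  | nil => simp only [List.foldl_nil]; exact (zipWith_left counts strings hlen).symm
  | cons i l ih =>
    simp only [List.foldl_cons]
    rw [ih _ (by rw [List.length_zipWith, hlen, Nat.min_self]), zipWith_zipWith]

-- set-of-keys membership coincides with A's dict-membership test
theorem allowed_eq_memAt (chars : List (Int × List (String × Int))) (i : Int) (ch : Char) :
    PySem.Set.contains (allowedAt chars i) (String.ofList [ch]) = memAt chars i ch := by
  unfold allowedAt memAt
  cases h : PySem.Dict.get? (PySem.Dict.mk chars) i with
  | none => simp [PySem.Set.contains]
  | some d =>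
    simp only [Option.getD_some]
    rw [Bool.eq_iff_iff]
    simp [PySem.Set.contains, PySem.Dict.contains_mk, PySem.Set.mem_ofList, List.mem_map]

-- one sequence's column-indexed count is its row score
theorem colscore (chars : List (Int × List (String × Int))) (s : String) (w : Int)
    (hw : (s.toList.length : Int) ≤ w) :
    (PySem.List.pyRange 0 w 1).foldl (fun a i => colStep (allowedAt chars i) i a s) 0
      = scoreOf chars s := by
  have h0 : (0:Int) ≤ (s.toList.length : Int) := by positivity
  rw [PySem.List.pyRange_one_append 0 (s.toList.length : Int) w h0 hw, List.foldl_append]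
  have htail : ∀ (a : Int),
      (PySem.List.pyRange (s.toList.length : Int) w 1).foldl
        (fun a i => colStep (allowedAt chars i) i a s) a = a := by
    intro a
    rw [PySem.List.foldl_congr_mem _ _ (fun a _ => a) a ?_, foldl_id]
    intro acc i hi
    have hge := (PySem.List.mem_pyRange_one.mp hi).1
    unfold colStep
    rw [if_neg]
    rw [PySem.Str.len_eq]
    omega
  rw [htail]
  rw [scoreOf, PySem.List.enumerate_eq_map_pyRange s.toList 'x', List.foldl_map]
  have hlen : PySem.List.len s.toList = (s.toList.length : Int) := by
    simp [PySem.List.len]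
  rw [hlen]
  apply PySem.List.foldl_congr_mem
  intro acc i hi
  obtain ⟨h1, h2⟩ := PySem.List.mem_pyRange_one.mp hi
  obtain ⟨k, rfl⟩ : ∃ k : Nat, i = (k : Int) := ⟨i.toNat, (Int.toNat_of_nonneg h1).symm⟩
  have hk : k < s.toList.length := by exact_mod_cast h2
  unfold colStep
  rw [if_pos (by rw [PySem.Str.len_eq]; exact_mod_cast h2)]
  rw [PySem.Str.pyGet?_natCast, List.getElem?_eq_getElem hk]
  simp only [allowed_eq_memAt]
  rw [PySem.List.pyGetD_of_nonneg _ _ h1]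
  simp [List.getD_eq_getElem?_getD, List.getElem?_eq_getElem hk]

-- PySem.List.max? written with this file's own step function
theorem max?_eq (xs : List String) (f : String → Int) :
    PySem.List.max? xs f = xs.foldl (fun acc x => match acc with
      | none => some x
      | some m => if f m < f x then some x else some m) none := by
  unfold PySem.List.max?
  congr 1
  funext acc x
  cases acc <;> rfl

-- first-maximum structure of the running-max fold
theorem foldl_max_lt (f : String → Int) (l : List String) (M : Int)
    (h : ∀ y ∈ l, f y < M) (acc : Option String)
    (hacc : acc = none ∨ ∃ z, acc = some z ∧ f z < M) :
    (l.foldl (fun acc x => match acc with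
        | none => some x
        | some m => if f m < f x then some x else some m) acc) = none
      ∨ ∃ z, (l.foldl (fun acc x => match acc with
        | none => some x
        | some m => if f m < f x then some x else some m) acc) = some z ∧ f z < M := by
  induction l generalizing acc with
  | nil => simpa using hacc
  | cons x l ih =>
    simp only [List.foldl_cons]
    apply ih (fun y hy => h y (List.mem_cons_of_mem _ hy))
    rcases hacc with h0 | ⟨z, hz, hzM⟩
    · subst h0; exact Or.inr ⟨x, rfl, h x (by simp)⟩
    · subst hz
      by_cases hc : f z < f x
      · simp only [hc, if_true]; exact Or.inr ⟨x, rfl, h x (by simp)⟩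
      · simp only [hc, if_false]; exact Or.inr ⟨z, rfl, hzM⟩

theorem foldl_max_keep (f : String → Int) (l : List String) (x : String)
    (h : ∀ y ∈ l, f y ≤ f x) :
    (l.foldl (fun acc y => match acc with
        | none => some y
        | some m => if f m < f y then some y else some m) (some x)) = some x := by
  induction l with
  | nil => rfl
  | cons y l ih =>
    simp only [List.foldl_cons]
    have hxy : ¬ f x < f y := not_lt.mpr (h y (by simp))
    simp only [hxy, if_false]
    exact ih (fun y hy => h y (List.mem_cons_of_mem _ hy))

-- max? returns the FIRST maximal element
theorem max?_first (f : String → Int) (pre suf : List String) (x : String)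
    (hpre : ∀ y ∈ pre, f y < f x) (hsuf : ∀ y ∈ suf, f y ≤ f x) :
    PySem.List.max? (pre ++ x :: suf) f = some x := by
  rw [max?_eq, List.foldl_append, List.foldl_cons]
  rcases foldl_max_lt f pre (f x) hpre none (Or.inl rfl) with h0 | ⟨z, hz, hzx⟩
  · rw [h0]; exact foldl_max_keep f suf x hsuf
  · rw [hz]
    simp only [hzx, if_true]
    exact foldl_max_keep f suf x hsuf

-- ===== VERDICT (by name: the statement is the Claim_ definition above) =====
theorem most_com_spec : Claim_equal_most_com := by
  intro seqs chars _hdom hpre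
  obtain ⟨hne, hnd, -⟩ := hpre
  unfold Spec_most_com most_com most_com_alt
  obtain ⟨hkeys, -, hvals⟩ := outer_char chars (PySem.Dict.mk seqs) seqs PySem.Dict.empty
    (lookup_own seqs hnd) (fun p _ => PySem.Dict.contains_empty _) hnd
  rw [PySem.Dict.keys_empty, List.nil_append] at hkeys
  simp only []
  set names := seqs.map Prod.fst with hnames
  set strings := seqs.map Prod.snd with hstrings
  set scores := seqs.foldl (fun scores p =>
      let scores := scores.insert p.1 (0 : Int)
      let sequence := (PySem.Dict.get? (PySem.Dict.mk seqs) p.1).getD ""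
      (PySem.List.enumerate sequence.toList).foldl
        (fun scores q =>
          if memAt chars q.1 q.2 then scores.modify p.1 0 (· + 1) else scores)
        scores) PySem.Dict.empty with hscores
  set width : Int := PySem.List.maxD (strings.map PySem.Str.len) (fun x => x) 0 with hwidth
  -- every sequence fits in width
  have hwb : ∀ s ∈ strings, (s.toList.length : Int) ≤ width := by
    intro s hs
    have hmem : PySem.Str.len s ∈ strings.map PySem.Str.len := List.mem_map_of_mem hs
    rw [hwidth]
    unfold PySem.List.maxD
    cases hm : PySem.List.max? (strings.map PySem.Str.len) (fun x => x) with
    | none =>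
      rw [PySem.List.max?_eq_none_iff] at hm
      rw [hm] at hmem
      exact absurd hmem (by simp)
    | some m =>
      have := PySem.List.max?_isMax hm _ hmem
      rw [PySem.Str.len_eq] at this
      simpa using this
  -- B's counts are the row scores, one per sequence
  have hlen_ns : names.length = strings.length := by simp [hnames, hstrings]
  have hcounts : (PySem.List.pyRange 0 width 1).foldl
      (fun counts i => List.zipWith (colStep (allowedAt chars i) i) counts strings)
      (List.replicate names.length 0)
      = strings.map (scoreOf chars) := by
    rw [hlen_ns, colfold chars _ _ strings (by simp), zipWith_replicate_zero]
    exact List.map_congr_left (fun s hs => colscore chars s width (hwb s hs))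
  rw [hcounts, hkeys]
  -- the maximum of the scores and its first index
  have hsne : strings ≠ [] := by
    intro h; rw [hstrings] at h; exact hne (by simpa using h)
  cases hmax : PySem.List.max? (strings.map (scoreOf chars)) (fun x => x) with
  | none =>
    rw [PySem.List.max?_eq_none_iff] at hmax
    exact absurd (by simpa using hmax) hsne
  | some m =>
    have hmem : m ∈ strings.map (scoreOf chars) := PySem.List.max?_mem hmax
    have hle := PySem.List.max?_isMax hmax
    obtain ⟨j0, hj0⟩ : ∃ j0, PySem.List.index? (strings.map (scoreOf chars)) m = some j0 := by
      have := (PySem.List.index?_isSome_iff (strings.map (scoreOf chars)) m).mpr hmem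
      exact Option.isSome_iff_exists.mp this
    obtain ⟨hj0len, hj0val, hj0first⟩ := PySem.List.getElem_of_index?_eq_some hj0
    have hj0len' : j0 < seqs.length := by simpa [hstrings] using hj0len
    have hj0n : j0 < names.length := by simpa [hnames] using hj0len'
    -- B's answer is names[j0]
    have hB : PySem.List.pyGet? names (j0 : Int) = some names[j0] := by
      rw [PySem.List.pyGet?_natCast, List.getElem?_eq_getElem hj0n]
    -- the key function agrees with the score list, index by index
    have hf : ∀ (i : Nat) (h : i < seqs.length),
        scores.getD (names[i]'(by simpa [hnames] using h)) 0
          = (strings.map (scoreOf chars))[i]'(by simpa [hstrings] using h) := by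
      intro i h
      have h1 : names[i]'(by simpa [hnames] using h) = (seqs[i]'h).1 := by
        simp [hnames]
      have h2 : (strings.map (scoreOf chars))[i]'(by simpa [hstrings] using h)
          = scoreOf chars (seqs[i]'h).2 := by
        simp [hstrings]
      rw [h1, h2]
      exact hvals (seqs[i]'h) (List.getElem_mem h)
  -- A's max? over names picks names[j0]
    have hA : PySem.List.max? names (fun k => scores.getD k 0) = some names[j0] := by
      have hdecomp : names = names.take j0 ++ names[j0] :: names.drop (j0 + 1) := by
        conv_lhs => rw [← List.take_append_drop j0 names]
        rw [List.drop_eq_getElem_cons hj0n]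
      have hpre : ∀ y ∈ names.take j0, scores.getD y 0 < scores.getD (names[j0]'hj0n) 0 := by
        intro y hy
        rw [List.mem_iff_getElem] at hy
        obtain ⟨i, hi, rfl⟩ := hy
        have hij : i < j0 := by simp at hi; exact hi.1
        have hiN : i < names.length := lt_trans hij hj0n
        have hiS : i < seqs.length := by simpa [hnames] using hiN
        have hiV : i < (strings.map (scoreOf chars)).length := by
          simpa [hstrings] using hiS
        rw [List.getElem_take, hf i hiS, hf j0 hj0len', hj0val]
        have hlt : (strings.map (scoreOf chars))[i] ≤ m := hle _ (List.getElem_mem hiV)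
        have hne' : (strings.map (scoreOf chars))[i] ≠ m := hj0first i hij
        omega
      have hsuf : ∀ y ∈ names.drop (j0 + 1), scores.getD y 0 ≤ scores.getD (names[j0]'hj0n) 0 := by
        intro y hy
        rw [List.mem_iff_getElem] at hy
        obtain ⟨i, hi, rfl⟩ := hy
        have hiN : j0 + 1 + i < names.length := by
          have h' := hi; simp only [List.length_drop] at h'; omega
        have hiS : j0 + 1 + i < seqs.length := by simpa [hnames] using hiN
        have hD : (names.drop (j0 + 1))[i] = names[j0 + 1 + i]'hiN := by
          rw [List.getElem_drop]
        rw [hD, hf (j0 + 1 + i) hiS, hf j0 hj0len', hj0val]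
        exact hle _ (List.getElem_mem (by simpa [hstrings] using hiS))
      have h' := max?_first (fun k => scores.getD k 0) (names.take j0)
          (names.drop (j0 + 1)) (names[j0]'hj0n) hpre hsuf
      rwa [← hdecomp] at h'
    simp only [hA, hj0, hB, Option.getD_some]
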